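-- pv_equiv track=rewrite | github.com/avilamowski/hyper_jade | ejemplos/ej1-2025-s1-r2/alumn_21.py | sacapalabras
-- ===== SOURCE A (Python) =====
-- def split_espacio(texto, separador=" "):
--     resultado = []
--     palabra = ""
--     for char in texto:
--         if char == separador:
--             if palabra:
--                 resultado.append(palabra)
--                 palabra = ""
--         else:
--             palabra += char
--     if palabra:
--         resultado.append(palabra)
--     return resultado
--
-- def esolonumero(texto):
--     letras = ""
--     for i in texto:
--         if "A" <= i <= "Z" or "a" <= i <= "z":
--             letras += i
--     if letras != "":
--         return True
--     else:
--         return False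
--
-- def texto_en_min(texto):
--     text = ""
--     for c in texto:
--         if "A" <= c <= "Z":
--             text += chr(ord(c) + 32)
--         else:
--             text += c
--     return text
--
-- def sacapalabras(texto):
--     palabras = []
--     text = split_espacio(texto)
--     for i in text:
--         palabra = ""
--         for j in i:
--             if "A" <= j <= "Z" or "a" <= j <= "z" or "0" <= j <= "9":
--                 palabra += j
--         palabra = texto_en_min(palabra)
--         if palabra != "" and esolonumero(palabra) and palabra not in palabras:
--             palabras.append(palabra)
--     return palabras
-- ===== SOURCE B (Python) =====
-- def sacapalabras(texto):
--     res = []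
--     word = ""
--     has_letter = False
--     for ch in texto:
--         if ch == " ":
--             if has_letter and word not in res:
--                 res.append(word)
--             word = ""
--             has_letter = False
--         elif "A" <= ch <= "Z":
--             word += chr(ord(ch) + 32)
--             has_letter = True
--         elif "a" <= ch <= "z":
--             word += ch
--             has_letter = True
--         elif "0" <= ch <= "9":
--             word += ch
--     if has_letter and word not in res:
--         res.append(word)
--     return res
-- ===== Notes on version B (the rewrite author's own statement) =====
-- stated objective: faster
-- what changed: Replaces A's split-into-words pass followed by per-word filter, lowercase and letter-check passes (each rebuilding strings) with a single streaming pass over the characters that maintains a current cleaned word and a has-letter flag, flushing on spaces and at the end.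
import Mathlib
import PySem

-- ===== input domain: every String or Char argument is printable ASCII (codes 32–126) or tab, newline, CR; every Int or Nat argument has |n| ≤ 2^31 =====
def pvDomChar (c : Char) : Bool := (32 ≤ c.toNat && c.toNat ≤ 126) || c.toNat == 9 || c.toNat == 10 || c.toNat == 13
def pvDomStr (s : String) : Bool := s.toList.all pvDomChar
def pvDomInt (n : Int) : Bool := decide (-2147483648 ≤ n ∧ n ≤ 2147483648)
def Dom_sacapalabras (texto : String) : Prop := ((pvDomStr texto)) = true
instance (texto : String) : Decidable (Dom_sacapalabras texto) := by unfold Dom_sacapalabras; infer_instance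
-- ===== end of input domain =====

-- B replaces A's split-into-words pass followed by per-word filter/lowercase/letter-check
-- passes with ONE streaming pass over the characters (objective: faster; constant-factor).

-- ===== PORT A =====
-- split_espacio(texto, separador=" "): fold over chars with state (resultado, palabra), then a final flush
def pvSplitStep (sep : List Char) (st : List (List Char) × List Char) (c : Char) :
    List (List Char) × List Char :=
  if [c] = sep then (if st.2 ≠ [] then (st.1 ++ [st.2], []) else st) else (st.1, st.2 ++ [c])

def splitEspacio (texto : List Char) (sep : List Char) : List (List Char) :=
  let st := texto.foldl (pvSplitStep sep) ([], [])
  if st.2 ≠ [] then st.1 ++ [st.2] else st.1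

def esolonumero (texto : List Char) : Bool :=
  let letras := texto.foldl
    (fun acc i => if ('A' ≤ i ∧ i ≤ 'Z') ∨ ('a' ≤ i ∧ i ≤ 'z') then acc ++ [i] else acc) []
  if letras ≠ [] then true else false

def textoEnMin (texto : List Char) : List Char :=
  texto.foldl
    (fun acc c => if 'A' ≤ c ∧ c ≤ 'Z' then acc ++ [Char.ofNat (c.toNat + 32)] else acc ++ [c]) []

def sacapalabrasChars (texto : List Char) : List (List Char) :=
  (splitEspacio texto [' ']).foldl
    (fun palabras i =>
      let palabra := i.foldl
        (fun acc j =>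
          if ('A' ≤ j ∧ j ≤ 'Z') ∨ ('a' ≤ j ∧ j ≤ 'z') ∨ ('0' ≤ j ∧ j ≤ '9')
          then acc ++ [j] else acc) []
      let palabra := textoEnMin palabra
      if palabra ≠ [] ∧ esolonumero palabra = true ∧ palabra ∉ palabras
      then palabras ++ [palabra] else palabras) []

def sacapalabras (texto : String) : List String :=
  (sacapalabrasChars texto.toList).map String.mk

-- ===== PORT B =====
-- flush of Source B's loop: append the current word if it has a letter and is new
def bFlush (res : List (List Char)) (word : List Char) (hL : Bool) : List (List Char) :=
  if hL = true ∧ word ∉ res then res ++ [word] else res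

-- the single streaming pass of Source B
def bGo (cs : List Char) (res : List (List Char)) (word : List Char) (hL : Bool) :
    List (List Char) :=
  match cs with
  | [] => bFlush res word hL
  | c :: rest =>
    if c = ' ' then bGo rest (bFlush res word hL) [] false
    else if 'A' ≤ c ∧ c ≤ 'Z' then bGo rest res (word ++ [Char.ofNat (c.toNat + 32)]) true
    else if 'a' ≤ c ∧ c ≤ 'z' then bGo rest res (word ++ [c]) true
    else if '0' ≤ c ∧ c ≤ '9' then bGo rest res (word ++ [c]) hL
    else bGo rest res word hL

def sacapalabras_alt (texto : String) : List String :=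
  (bGo texto.toList [] [] false).map String.mk

-- ===== PRECONDITION & SPEC =====
def Spec_sacapalabras (texto : String) (out : List String) : Prop := out = sacapalabras_alt texto
instance (texto : String) (out : List String) : Decidable (Spec_sacapalabras texto out) := by unfold Spec_sacapalabras; infer_instance

-- ===== CLAIM (what is proved, stated in full; the proofs are below) =====
def Claim_equal_sacapalabras : Prop := ∀ (texto : String), Dom_sacapalabras texto → Spec_sacapalabras texto (sacapalabras texto)

-- ===== LEMMAS AND PROOFS =====

def isAl (c : Char) : Bool := decide (('A' ≤ c ∧ c ≤ 'Z') ∨ ('a' ≤ c ∧ c ≤ 'z'))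

def isAn (c : Char) : Bool :=
  decide (('A' ≤ c ∧ c ≤ 'Z') ∨ ('a' ≤ c ∧ c ≤ 'z') ∨ ('0' ≤ c ∧ c ≤ '9'))

def lc (c : Char) : Char := if 'A' ≤ c ∧ c ≤ 'Z' then Char.ofNat (c.toNat + 32) else c

def clean (t : List Char) : List Char := (t.filter isAn).map lc

-- one step of A's main loop, in closed form
def stepA (acc : List (List Char)) (t : List Char) : List (List Char) :=
  if clean t ≠ [] ∧ esolonumero (clean t) = true ∧ clean t ∉ acc then acc ++ [clean t] else acc

-- A's split as a structural recursion over the remaining characters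
def splitRec : List Char → List Char → List (List Char)
  | palabra, [] => if palabra = [] then [] else [palabra]
  | palabra, c :: cs =>
    if c = ' ' then (if palabra = [] then splitRec [] cs else palabra :: splitRec [] cs)
    else splitRec (palabra ++ [c]) cs

theorem char_le_iff (a b : Char) : a ≤ b ↔ a.toNat ≤ b.toNat := by
  rw [Char.le_def, UInt32.le_iff_toNat_le]; simp [Char.toNat_val]

theorem ofNat_toNat32 (c : Char) (hb : c.toNat ≤ 90) :
    (Char.ofNat (c.toNat + 32)).toNat = c.toNat + 32 := by
  have hv : Nat.isValidChar (c.toNat + 32) := Or.inl (by omega)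
  rw [Char.ofNat, dif_pos hv]
  show (UInt32.ofNatLT _ _).toNat = _
  simp [UInt32.toNat_ofNatLT]
  omega

theorem splitFold_eq (cs : List Char) : ∀ (res : List (List Char)) (palabra : List Char),
    (let st := cs.foldl (pvSplitStep [' ']) (res, palabra)
     if st.2 ≠ [] then st.1 ++ [st.2] else st.1) = res ++ splitRec palabra cs := by
  induction cs with
  | nil => intro res palabra; by_cases h : palabra = [] <;> simp [splitRec, h]
  | cons c cs ih =>
    intro res palabra
    by_cases hc : c = ' '
    · by_cases hp : palabra = [] <;>
        simp [splitRec, pvSplitStep, hc, hp, ih, List.append_assoc]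
    · have : ¬ ([c] = [' ']) := by simpa using hc
      simp [splitRec, pvSplitStep, hc, this, ih]

theorem splitEspacio_eq (cs : List Char) : splitEspacio cs [' '] = splitRec [] cs := by
  simpa [splitEspacio] using splitFold_eq cs [] []

theorem filter_fold_eq (t : List Char) : ∀ acc : List Char,
    t.foldl (fun acc j =>
      if ('A' ≤ j ∧ j ≤ 'Z') ∨ ('a' ≤ j ∧ j ≤ 'z') ∨ ('0' ≤ j ∧ j ≤ '9')
      then acc ++ [j] else acc) acc = acc ++ t.filter isAn := by
  induction t with
  | nil => simp
  | cons c t ih =>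
    intro acc
    by_cases h : ('A' ≤ c ∧ c ≤ 'Z') ∨ ('a' ≤ c ∧ c ≤ 'z') ∨ ('0' ≤ c ∧ c ≤ '9') <;>
      simp [isAn, h, ih]

theorem textoEnMin_eq (t : List Char) : textoEnMin t = t.map lc := by
  have h : ∀ (t : List Char) (acc : List Char),
      t.foldl (fun acc c =>
        if 'A' ≤ c ∧ c ≤ 'Z' then acc ++ [Char.ofNat (c.toNat + 32)] else acc ++ [c]) acc
        = acc ++ t.map lc := by
    intro t
    induction t with
    | nil => simp
    | cons c t ih =>
      intro acc
      by_cases hc : 'A' ≤ c ∧ c ≤ 'Z' <;> simp [lc, hc, ih]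
  simpa [textoEnMin] using h t []

theorem esolonumero_eq (w : List Char) : esolonumero w = w.any isAl := by
  have h : ∀ (w : List Char) (acc : List Char),
      w.foldl (fun acc i =>
        if ('A' ≤ i ∧ i ≤ 'Z') ∨ ('a' ≤ i ∧ i ≤ 'z') then acc ++ [i] else acc) acc
        = acc ++ w.filter isAl := by
    intro w
    induction w with
    | nil => simp
    | cons c w ih =>
      intro acc
      by_cases hc : ('A' ≤ c ∧ c ≤ 'Z') ∨ ('a' ≤ c ∧ c ≤ 'z') <;>
        simp [isAl, hc, ih]
  unfold esolonumero
  rw [h w [], List.nil_append]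
  by_cases hw : w.any isAl = true
  · obtain ⟨x, hx, hpx⟩ := List.any_eq_true.mp hw
    have hne : w.filter isAl ≠ [] := by
      intro h0
      rw [List.filter_eq_nil_iff] at h0
      exact absurd hpx (by simpa using h0 x hx)
    simp [hne, hw]
  · have hnil : w.filter isAl = [] := by
      rw [List.filter_eq_nil_iff]
      intro a ha hpa
      exact hw (List.any_eq_true.mpr ⟨a, ha, hpa⟩)
    simp only [Bool.not_eq_true] at hw
    simp [hnil, hw]

theorem stepA_eq_pyStep (acc : List (List Char)) (t : List Char) :
    (let palabra := t.foldl
        (fun acc j =>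
          if ('A' ≤ j ∧ j ≤ 'Z') ∨ ('a' ≤ j ∧ j ≤ 'z') ∨ ('0' ≤ j ∧ j ≤ '9')
          then acc ++ [j] else acc) []
     let palabra := textoEnMin palabra
     if palabra ≠ [] ∧ esolonumero palabra = true ∧ palabra ∉ acc
     then acc ++ [palabra] else acc) = stepA acc t := by
  simp only [filter_fold_eq, textoEnMin_eq, List.nil_append, stepA, clean]

theorem sacapalabrasChars_eq (cs : List Char) :
    sacapalabrasChars cs = (splitRec [] cs).foldl stepA [] := by
  unfold sacapalabrasChars
  rw [splitEspacio_eq]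
  congr 1
  funext acc t
  exact stepA_eq_pyStep acc t

theorem flush_eq_stepA (res : List (List Char)) (t : List Char) :
    bFlush res (clean t) ((clean t).any isAl) = stepA res t := by
  unfold bFlush stepA
  rw [esolonumero_eq]
  by_cases h : (clean t).any isAl = true
  · have hne : clean t ≠ [] := by
      rcases List.any_eq_true.mp h with ⟨x, hx, _⟩
      intro hnil; simp [hnil] at hx
    simp [h, hne]
  · simp [h]

theorem stepA_nil (res : List (List Char)) : stepA res [] = res := by
  simp [stepA, clean]

theorem bGo_eq (cs : List Char) : ∀ (res : List (List Char)) (palabra : List Char),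
    bGo cs res (clean palabra) ((clean palabra).any isAl)
      = (splitRec palabra cs).foldl stepA res := by
  induction cs with
  | nil =>
    intro res palabra
    by_cases hp : palabra = []
    · simp [bGo, splitRec, hp, clean, bFlush]
    · simp [bGo, splitRec, hp, flush_eq_stepA]
  | cons c cs ih =>
    intro res palabra
    by_cases hc : c = ' '
    · subst hc
      show bGo cs (bFlush res (clean palabra) ((clean palabra).any isAl)) [] false
          = (splitRec palabra (' ' :: cs)).foldl stepA res
      rw [flush_eq_stepA]
      have h0 : bGo cs (stepA res palabra) [] false
          = (splitRec [] cs).foldl stepA (stepA res palabra) := by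
        have := ih (stepA res palabra) []
        rwa [show clean [] = [] from rfl, show List.any [] isAl = false from rfl] at this
      rw [h0]
      show _ = (if palabra = [] then splitRec [] cs
                else palabra :: splitRec [] cs).foldl stepA res
      by_cases hp : palabra = []
      · rw [if_pos hp, hp, stepA_nil]
      · rw [if_neg hp, List.foldl_cons]
    · have hcl : ∀ (_ : isAn c = true), clean (palabra ++ [c]) = clean palabra ++ [lc c] := by
        intro h; simp [clean, List.filter_append, List.filter_cons, h]
      have hcl' : ∀ (_ : isAn c = false), clean (palabra ++ [c]) = clean palabra := by
        intro h; simp [clean, List.filter_append, List.filter_cons, h]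
      by_cases hU : 'A' ≤ c ∧ c ≤ 'Z'
      · have hb : 65 ≤ c.toNat ∧ c.toNat ≤ 90 := by simpa [char_le_iff] using hU
        have han : isAn c = true := by
          simp only [isAn, decide_eq_true_eq, char_le_iff, show ('A').toNat = 65 from rfl, show ('Z').toNat = 90 from rfl, show ('a').toNat = 97 from rfl, show ('z').toNat = 122 from rfl, show ('0').toNat = 48 from rfl, show ('9').toNat = 57 from rfl]; omega
        have hlc : lc c = Char.ofNat (c.toNat + 32) := by simp [lc, hU]
        have hal : isAl (lc c) = true := by
          have ht := ofNat_toNat32 c hb.2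
          rw [hlc]
          simp only [isAl, decide_eq_true_eq, char_le_iff, ht, show ('A').toNat = 65 from rfl, show ('Z').toNat = 90 from rfl, show ('a').toNat = 97 from rfl, show ('z').toNat = 122 from rfl, show ('0').toNat = 48 from rfl, show ('9').toNat = 57 from rfl]
          omega
        have := ih res (palabra ++ [c])
        rw [hcl han] at this
        simp only [bGo, hc, if_pos hU, splitRec]
        rw [← hlc]
        simpa [hal, List.any_append] using this
      · by_cases hL : 'a' ≤ c ∧ c ≤ 'z'
        · have hb : 97 ≤ c.toNat ∧ c.toNat ≤ 122 := by simpa [char_le_iff] using hL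
          have han : isAn c = true := by
            simp only [isAn, decide_eq_true_eq, char_le_iff, show ('A').toNat = 65 from rfl, show ('Z').toNat = 90 from rfl, show ('a').toNat = 97 from rfl, show ('z').toNat = 122 from rfl, show ('0').toNat = 48 from rfl, show ('9').toNat = 57 from rfl]; omega
          have hal : isAl c = true := by
            simp only [isAl, decide_eq_true_eq, char_le_iff, show ('A').toNat = 65 from rfl, show ('Z').toNat = 90 from rfl, show ('a').toNat = 97 from rfl, show ('z').toNat = 122 from rfl, show ('0').toNat = 48 from rfl, show ('9').toNat = 57 from rfl]; omega
          have hlc : lc c = c := by simp [lc, hU]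
          have := ih res (palabra ++ [c])
          rw [hcl han, hlc] at this
          simp only [bGo, hc, if_neg hU, if_pos hL, splitRec]
          simpa [hal, List.any_append] using this
        · by_cases hD : '0' ≤ c ∧ c ≤ '9'
          · have hb : 48 ≤ c.toNat ∧ c.toNat ≤ 57 := by simpa [char_le_iff] using hD
            have han : isAn c = true := by
              simp only [isAn, decide_eq_true_eq, char_le_iff, show ('A').toNat = 65 from rfl, show ('Z').toNat = 90 from rfl, show ('a').toNat = 97 from rfl, show ('z').toNat = 122 from rfl, show ('0').toNat = 48 from rfl, show ('9').toNat = 57 from rfl]; omega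
            have hal : isAl c = false := by
              simp only [isAl, decide_eq_false_iff_not, char_le_iff, show ('A').toNat = 65 from rfl, show ('Z').toNat = 90 from rfl, show ('a').toNat = 97 from rfl, show ('z').toNat = 122 from rfl, show ('0').toNat = 48 from rfl, show ('9').toNat = 57 from rfl]; omega
            have hlc : lc c = c := by simp [lc, hU]
            have := ih res (palabra ++ [c])
            rw [hcl han, hlc] at this
            simp only [bGo, hc, if_neg hU, if_neg hL, if_pos hD, splitRec]
            simpa [hal, List.any_append] using this
          · have hbU : ¬ (65 ≤ c.toNat ∧ c.toNat ≤ 90) := by simpa [char_le_iff] using hU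
            have hbL : ¬ (97 ≤ c.toNat ∧ c.toNat ≤ 122) := by simpa [char_le_iff] using hL
            have hbD : ¬ (48 ≤ c.toNat ∧ c.toNat ≤ 57) := by simpa [char_le_iff] using hD
            have han : isAn c = false := by
              simp only [isAn, decide_eq_false_iff_not, char_le_iff, show ('A').toNat = 65 from rfl, show ('Z').toNat = 90 from rfl, show ('a').toNat = 97 from rfl, show ('z').toNat = 122 from rfl, show ('0').toNat = 48 from rfl, show ('9').toNat = 57 from rfl]; omega
            have := ih res (palabra ++ [c])
            rw [hcl' han] at this
            simp only [bGo, hc, if_neg hU, if_neg hL, if_neg hD, splitRec]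
            exact this

-- ===== VERDICT (by name: the statement is the Claim_ definition above) =====
theorem sacapalabras_spec : Claim_equal_sacapalabras := by
  intro texto _
  unfold Spec_sacapalabras sacapalabras sacapalabras_alt
  have h := bGo_eq texto.toList [] []
  rw [show clean [] = [] from rfl, show List.any [] isAl = false from rfl] at h
  rw [sacapalabrasChars_eq, ← h]
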